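-- pv_equiv track=rewrite | github.com/dustinbowers/advent-of-code | 2024/day07_bridge_repair/main.py | solve
-- ===== SOURCE A (Python) =====
-- def solve(calibrations, concat_enabled):
--     def backtrack(target, operands, current_index, current_value, concat_enabled):
--         # Early out
--         if current_value > target:
--             return None
--
--         # Base
--         if current_index == len(operands):
--             if current_value == target:
--                 return True
--             return None
--
--         next_operand = operands[current_index]
--
--         result_add = backtrack(
--             target,
--             operands,
--             current_index + 1,
--             current_value + next_operand,
--             concat_enabled)
--         if result_add:
--             return result_add
--
--         result_multiply = backtrack(
--             target,
--             operands,
--             current_index + 1,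
--             current_value * next_operand,
--             concat_enabled)
--         if result_multiply:
--             return result_multiply
--
--         if concat_enabled:
--             result_concat = backtrack(
--                 target,
--                 operands,
--                 current_index + 1,
--                 int(f"{current_value}{next_operand}"),
--                 concat_enabled)
--             if result_concat:
--                 return result_concat
--
--         return None
--
--     calibration_sum = 0
--     for c in calibrations:
--         target, operands = c
--
--         if len(operands) == 1:
--             if operands[0] == target:
--                 calibration_sum += target
--             continue
--
--         res = backtrack(target,
--                         operands,
--                         1,
--                         operands[0],
--                         concat_enabled)
--         if res:
--             calibration_sum += c[0]
--
--     return calibration_sum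
-- ===== SOURCE B (Python) =====
-- def solve(calibrations, concat_enabled):
--     # Dedup DP (BFS over the set of distinct reachable values, pruned to <= target),
--     # instead of A's exponential DFS backtracking. Digit concatenation is only
--     # applied for a nonnegative right operand (where it is well defined).
--     total = 0
--     for target, operands in calibrations:
--         first = operands[0]
--         vals = {first} if first <= target else set()
--         for a in operands[1:]:
--             nxt = set()
--             for v in vals:
--                 if v + a <= target:
--                     nxt.add(v + a)
--                 if v * a <= target:
--                     nxt.add(v * a)
--                 if concat_enabled and a >= 0:
--                     w = int(str(v) + str(a))
--                     if w <= target: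
--                         nxt.add(w)
--             vals = nxt
--         if target in vals:
--             total += target
--     return total
-- ===== Notes on version B (the rewrite author's own statement) =====
-- stated objective: alternative
-- what changed: A's exponential DFS backtracking over operator choices is replaced by a breadth-first deduplicated DP that keeps the set of distinct reachable values (pruned to <= target, exactly A's pruning) and advances it one operand at a time; B applies digit concatenation only to a nonnegative right operand, so it returns (matching A wherever A returns) where A's int(f-string) raises ValueError.
-- outside the precondition, e.g. on solve([(5, [])], False): A raises IndexError, B raises IndexError; on solve([(53, [5, -3])], True): A raises ValueError, B returns 0; on solve([(4, [4, -3, 4]), (-3, [4, 1]), (-2, [-3])], True): A returns 4, B returns 4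
import Mathlib
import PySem

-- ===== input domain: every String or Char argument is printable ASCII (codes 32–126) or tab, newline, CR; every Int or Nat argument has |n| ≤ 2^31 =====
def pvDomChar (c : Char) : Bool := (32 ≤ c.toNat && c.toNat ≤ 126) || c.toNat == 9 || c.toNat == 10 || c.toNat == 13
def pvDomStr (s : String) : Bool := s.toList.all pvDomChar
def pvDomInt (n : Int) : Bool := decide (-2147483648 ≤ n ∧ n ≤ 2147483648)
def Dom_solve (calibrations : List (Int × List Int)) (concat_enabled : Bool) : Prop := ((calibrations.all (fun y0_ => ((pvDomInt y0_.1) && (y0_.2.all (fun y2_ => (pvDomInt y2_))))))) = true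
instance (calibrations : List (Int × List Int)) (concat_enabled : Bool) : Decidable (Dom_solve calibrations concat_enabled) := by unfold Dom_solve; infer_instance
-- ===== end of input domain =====

-- B replaces A's DFS backtracking over operator choices by a deduplicated breadth-first DP over
-- the set of reachable values (pruned to ≤ target, exactly A's pruning), one pass per operand;
-- B applies digit concatenation only to a nonnegative right operand, so it returns where A's
-- int(f"{v}{a}") raises ValueError (objective: alternative search strategy).

-- shared helper: int(f"{v}{a}") / int(str(v)+str(a)); exact whenever the parse succeeds
-- (A hits it on every admitted input only with 0 ≤ a, where it parses; Python raises ValueError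
-- for a < 0 — those inputs are outside Pre_solve).
def pyConcatInt (v a : Int) : Int :=
  (PySem.Int.ofStr? (PySem.Int.toStr v ++ PySem.Int.toStr a)).getD 0

-- ===== PORT A =====
-- literal port of A's recursive `backtrack` (index recursion becomes structural recursion on the suffix)
def backtrackA (target : Int) (rest : List Int) (v : Int) (concat_enabled : Bool) : Option Bool :=
  if v > target then none
  else
    match rest with
    | [] => if v = target then some true else none
    | a :: r =>
      match backtrackA target r (v + a) concat_enabled with
      | some true => some true
      | _ =>
        match backtrackA target r (v * a) concat_enabled with
        | some true => some true
        | _ =>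
          if concat_enabled then backtrackA target r (pyConcatInt v a) concat_enabled
          else none

def solve (calibrations : List (Int × List Int)) (concat_enabled : Bool) : Int :=
  calibrations.foldl (fun calibration_sum c =>
    let target := c.1
    let operands := c.2
    match operands with
    | [] => calibration_sum           -- Python raises IndexError here (outside Pre_solve)
    | [a] => if a = target then calibration_sum + target else calibration_sum
    | a :: r =>
      match backtrackA target r a concat_enabled with
      | some true => calibration_sum + c.1
      | _ => calibration_sum) 0

-- ===== PORT B =====
-- one BFS level: all children of `vals` under operand `a` that are ≤ target, as a set
-- (concat only when concat_enabled and 0 ≤ a, exactly as Source B)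
def stepB (target : Int) (concat_enabled : Bool) (vals : PySem.Set Int) (a : Int) : PySem.Set Int :=
  vals.foldl (fun nxt v =>
    let nxt := if v + a ≤ target then PySem.Set.add nxt (v + a) else nxt
    let nxt := if v * a ≤ target then PySem.Set.add nxt (v * a) else nxt
    if concat_enabled = true ∧ 0 ≤ a then
      if pyConcatInt v a ≤ target then PySem.Set.add nxt (pyConcatInt v a) else nxt
    else nxt) PySem.Set.empty

def solve_alt (calibrations : List (Int × List Int)) (concat_enabled : Bool) : Int :=
  calibrations.foldl (fun total c =>
    let target := c.1
    match c.2 with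
    | [] => total                     -- Python raises IndexError here (outside Pre_solve)
    | first :: restOps =>
      let init : PySem.Set Int := if first ≤ target then PySem.Set.add PySem.Set.empty first else PySem.Set.empty
      let vals := restOps.foldl (stepB target concat_enabled) init
      if vals.contains target then total + target else total) 0

-- ===== PRECONDITION & SPEC =====
-- Pre_solve excludes the inputs on which the Python A raises: an empty operand list (IndexError on
-- operands[0]) and, with concat enabled, lines with a negative operand after the first whose search
-- is not pruned at the root (first operand ≤ target), where A's int(f"{v}{a}") raises ValueError at
-- the first evaluated concat; on the search-order-dependent (hence not closed-form) subset of the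
-- latter where A's DFS happens to return before any such concat, B returns the same value (see
-- claim cites), so the exclusion is conservative only there.
def Pre_solve (calibrations : List (Int × List Int)) (concat_enabled : Bool) : Prop :=
  ∀ c ∈ calibrations, c.2 ≠ [] ∧
    (concat_enabled = true → (∀ a ∈ c.2.tail, 0 ≤ a) ∨ c.1 < c.2.headI)

instance (calibrations : List (Int × List Int)) (concat_enabled : Bool) : Decidable (Pre_solve calibrations concat_enabled) := by unfold Pre_solve; infer_instance

def pvWitness_solve : (List (Int × List Int)) × Bool := ([(190, [-10, 19]), (156, [15, 6]), (21037, [9, 7, 18, 13])], true)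

def Spec_solve (calibrations : List (Int × List Int)) (concat_enabled : Bool) (out : Int) : Prop := out = solve_alt calibrations concat_enabled
instance (calibrations : List (Int × List Int)) (concat_enabled : Bool) (out : Int) : Decidable (Spec_solve calibrations concat_enabled out) := by unfold Spec_solve; infer_instance

-- ===== CLAIM (what is proved, stated in full; the proofs are below) =====
def Claim_equal_solve : Prop := ∀ (calibrations : List (Int × List Int)) (concat_enabled : Bool), Dom_solve calibrations concat_enabled → Pre_solve calibrations concat_enabled → Spec_solve calibrations concat_enabled (solve calibrations concat_enabled)

-- ===== LEMMAS AND PROOFS =====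

-- common specification: target reachable from v through rest with every intermediate value ≤ target
def reachb (target : Int) (rest : List Int) (v : Int) (c : Bool) : Bool :=
  if v > target then false
  else
    match rest with
    | [] => v == target
    | a :: r => reachb target r (v + a) c || reachb target r (v * a) c ||
                (c && reachb target r (pyConcatInt v a) c)

theorem backtrackA_eq_reachb (target : Int) (rest : List Int) (c : Bool) :
    ∀ v, backtrackA target rest v c = if reachb target rest v c then some true else none := by
  induction rest with
  | nil => intro v; simp [backtrackA, reachb]; split_ifs <;> simp_all
  | cons a r ih =>
    intro v
    simp only [backtrackA, reachb, ih]
    by_cases hv : v > target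
    · simp [hv]
    · simp only [hv, if_false]
      by_cases h1 : reachb target r (v + a) c
      · simp [h1]
      · by_cases h2 : reachb target r (v * a) c
        · simp [h1, h2]
        · cases c <;> simp [h1, h2]

theorem reachb_false_of_gt (target : Int) (rest : List Int) (v : Int) (c : Bool)
    (h : target < v) : reachb target rest v c = false := by
  cases rest <;> simp [reachb, h]

-- membership in `if w ≤ t then add s w else s`
theorem mem_filter_add (t w : Int) (s : PySem.Set Int) (x : Int) :
    x ∈ (if w ≤ t then PySem.Set.add s w else s) ↔ x ∈ s ∨ (w ≤ t ∧ x = w) := by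
  split_ifs with h <;> simp [PySem.Set.mem_add, h]

-- membership after one per-value body of stepB
theorem mem_stepB_body (target : Int) (c : Bool) (a v : Int) (nxt : PySem.Set Int) (x : Int) :
    x ∈ (let n1 := if v + a ≤ target then PySem.Set.add nxt (v + a) else nxt
         let n2 := if v * a ≤ target then PySem.Set.add n1 (v * a) else n1
         if c = true ∧ 0 ≤ a then
           if pyConcatInt v a ≤ target then PySem.Set.add n2 (pyConcatInt v a) else n2
         else n2) ↔
      x ∈ nxt ∨ ((v + a ≤ target ∧ x = v + a) ∨ (v * a ≤ target ∧ x = v * a) ∨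
        (c = true ∧ 0 ≤ a ∧ pyConcatInt v a ≤ target ∧ x = pyConcatInt v a)) := by
  by_cases hc : c = true ∧ 0 ≤ a
  · rw [if_pos hc]
    rw [mem_filter_add, mem_filter_add, mem_filter_add]
    obtain ⟨hc1, hc2⟩ := hc
    simp [hc1, hc2, or_assoc]
  · rw [if_neg hc]
    rw [mem_filter_add, mem_filter_add]
    constructor
    · rintro ((h | h) | h)
      · exact Or.inl h
      · exact Or.inr (Or.inl h)
      · exact Or.inr (Or.inr (Or.inl h))
    · rintro (h | (h | h | h))
      · exact Or.inl (Or.inl h)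
      · exact Or.inl (Or.inr h)
      · exact Or.inr h
      · exact absurd ⟨h.1, h.2.1⟩ hc

-- membership in one BFS level, over an arbitrary accumulator
theorem mem_stepB_foldl (target : Int) (c : Bool) (a : Int) (vs : List Int) :
    ∀ (s : PySem.Set Int) (x : Int),
      x ∈ vs.foldl (fun nxt v =>
          let n1 := if v + a ≤ target then PySem.Set.add nxt (v + a) else nxt
          let n2 := if v * a ≤ target then PySem.Set.add n1 (v * a) else n1
          if c = true ∧ 0 ≤ a then
            if pyConcatInt v a ≤ target then PySem.Set.add n2 (pyConcatInt v a) else n2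
          else n2) s ↔
        x ∈ s ∨ ∃ v ∈ vs, (v + a ≤ target ∧ x = v + a) ∨ (v * a ≤ target ∧ x = v * a) ∨
          (c = true ∧ 0 ≤ a ∧ pyConcatInt v a ≤ target ∧ x = pyConcatInt v a) := by
  induction vs with
  | nil => simp
  | cons v vs ih =>
    intro s x
    rw [List.foldl_cons, ih, mem_stepB_body]
    simp only [List.mem_cons]
    constructor
    · rintro ((h | h) | ⟨w, hw, h⟩)
      · exact Or.inl h
      · exact Or.inr ⟨v, Or.inl rfl, h⟩
      · exact Or.inr ⟨w, Or.inr hw, h⟩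
    · rintro (h | ⟨w, (rfl | hw), h⟩)
      · exact Or.inl (Or.inl h)
      · exact Or.inl (Or.inr h)
      · exact Or.inr ⟨w, hw, h⟩

theorem mem_stepB (target : Int) (c : Bool) (a : Int) (vals : PySem.Set Int) (x : Int) :
    x ∈ stepB target c vals a ↔
      ∃ v ∈ vals, (v + a ≤ target ∧ x = v + a) ∨ (v * a ≤ target ∧ x = v * a) ∨
        (c = true ∧ 0 ≤ a ∧ pyConcatInt v a ≤ target ∧ x = pyConcatInt v a) := by
  unfold stepB
  rw [mem_stepB_foldl]
  simp [PySem.Set.empty]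

theorem mem_stepB_le (target : Int) (c : Bool) (a : Int) (vals : PySem.Set Int) (x : Int)
    (h : x ∈ stepB target c vals a) : x ≤ target := by
  rcases (mem_stepB target c a vals x).mp h with ⟨v, _, ⟨h1, rfl⟩ | ⟨h1, rfl⟩ | ⟨_, _, h1, rfl⟩⟩ <;>
    exact h1

-- main invariant: target appears in the final BFS set iff it is reachb-reachable from some seed;
-- needs the Pre_solve fact that every consumed operand is ≥ 0 whenever concat is enabled
theorem target_mem_foldl_stepB (target : Int) (c : Bool) (rest : List Int)
    (hpre : c = true → ∀ a ∈ rest, 0 ≤ a) :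
    ∀ (S : PySem.Set Int), (∀ v ∈ S, v ≤ target) →
      (target ∈ rest.foldl (stepB target c) S ↔ ∃ v ∈ S, reachb target rest v c = true) := by
  induction rest with
  | nil =>
    intro S hS
    simp only [List.foldl_nil]
    constructor
    · intro h
      exact ⟨target, h, by simp [reachb]⟩
    · rintro ⟨v, hv, hr⟩
      have hle := hS v hv
      simp only [reachb] at hr
      rw [if_neg (by omega)] at hr
      simp at hr
      exact hr ▸ hv
  | cons a r ih =>
    intro S hS
    have ha : c = true → 0 ≤ a := fun hc => hpre hc a (by simp)
    have hpre' : c = true → ∀ b ∈ r, 0 ≤ b := fun hc b hb => hpre hc b (by simp [hb])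
    simp only [List.foldl_cons]
    rw [ih hpre' (stepB target c S a) (fun v hv => mem_stepB_le target c a S v hv)]
    constructor
    · rintro ⟨w, hw, hr⟩
      rcases (mem_stepB target c a S w).mp hw with ⟨v, hv, hcases⟩
      refine ⟨v, hv, ?_⟩
      have hvle := hS v hv
      simp only [reachb, if_neg (by omega : ¬ v > target)]
      rcases hcases with ⟨_, h⟩ | ⟨_, h⟩ | ⟨hc, _, _, h⟩ <;> subst h <;> simp [hr] <;> simp [hc]
    · rintro ⟨v, hv, hr⟩
      have hvle := hS v hv
      simp only [reachb, if_neg (by omega : ¬ v > target)] at hr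
      simp only [Bool.or_eq_true, Bool.and_eq_true] at hr
      rcases hr with (h | h) | ⟨hc, h⟩
      · have hle : v + a ≤ target := by
          by_contra hgt
          rw [reachb_false_of_gt target r (v + a) c (by omega)] at h
          exact absurd h (by simp)
        exact ⟨v + a, (mem_stepB target c a S _).mpr ⟨v, hv, Or.inl ⟨hle, rfl⟩⟩, h⟩
      · have hle : v * a ≤ target := by
          by_contra hgt
          rw [reachb_false_of_gt target r (v * a) c (by omega)] at h
          exact absurd h (by simp)
        exact ⟨v * a, (mem_stepB target c a S _).mpr ⟨v, hv, Or.inr (Or.inl ⟨hle, rfl⟩)⟩, h⟩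
      · have hle : pyConcatInt v a ≤ target := by
          by_contra hgt
          rw [reachb_false_of_gt target r (pyConcatInt v a) c (by omega)] at h
          exact absurd h (by simp)
        exact ⟨pyConcatInt v a,
          (mem_stepB target c a S _).mpr ⟨v, hv, Or.inr (Or.inr ⟨hc, ha hc, hle, rfl⟩)⟩, h⟩

-- bridge: Set.contains as membership
theorem set_contains_iff (s : PySem.Set Int) (x : Int) : s.contains x = true ↔ x ∈ s := by
  simp [PySem.Set.contains]

-- the empty set is a fixed point of every BFS level
theorem foldl_stepB_empty (target : Int) (c : Bool) (rest : List Int) :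
    rest.foldl (stepB target c) PySem.Set.empty = PySem.Set.empty := by
  induction rest with
  | nil => rfl
  | cons a r ih => exact ih

-- per-calibration agreement on a nonempty operand list; Pre_solve supplies either nonnegative
-- tail operands (concat on) or a root-pruned line (first > target)
theorem line_eq (target : Int) (c : Bool) (first : Int) (restOps : List Int) (acc : Int)
    (hpre0 : (c = true → ∀ a ∈ restOps, 0 ≤ a) ∨ target < first) :
    (match restOps with
     | [] => if first = target then acc + target else acc
     | b :: r =>
       match backtrackA target (b :: r) first c with
       | some true => acc + target
       | _ => acc) =
    (if (restOps.foldl (stepB target c)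
          (if first ≤ target then PySem.Set.add PySem.Set.empty first else PySem.Set.empty)).contains target
      then acc + target else acc) := by
  rcases hpre0 with hpre | hgt
  swap
  · rw [if_neg (by omega : ¬ first ≤ target), foldl_stepB_empty]
    have hcont : (PySem.Set.empty : PySem.Set Int).contains target = false := rfl
    rw [hcont]
    simp only [Bool.false_eq_true, if_false]
    cases restOps with
    | nil =>
      have hne : first ≠ target := by omega
      simp [hne]
    | cons b r =>
      show (match backtrackA target (b :: r) first c with
            | some true => acc + target
            | _ => acc) = acc
      have hb : backtrackA target (b :: r) first c = none := by
        unfold backtrackA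
        rw [if_pos hgt]
      rw [hb]
  have hmem : target ∈ restOps.foldl (stepB target c)
      (if first ≤ target then PySem.Set.add PySem.Set.empty first else PySem.Set.empty) ↔
      reachb target restOps first c = true := by
    rw [target_mem_foldl_stepB target c restOps hpre]
    · constructor
      · rintro ⟨v, hv, hr⟩
        split_ifs at hv with hle
        · simp [PySem.Set.empty] at hv
          exact hv ▸ hr
        · simp [PySem.Set.empty] at hv
      · intro hr
        have hle : first ≤ target := by
          by_contra hgt
          rw [reachb_false_of_gt target restOps first c (by omega)] at hr
          exact absurd hr (by simp)
        exact ⟨first, by simp [hle, PySem.Set.empty], hr⟩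
    · intro v hv
      split_ifs at hv with hle
      · simp [PySem.Set.empty] at hv
        omega
      · simp [PySem.Set.empty] at hv
  by_cases hr : reachb target restOps first c = true
  · have hc : (restOps.foldl (stepB target c)
        (if first ≤ target then PySem.Set.add PySem.Set.empty first else PySem.Set.empty)).contains target = true :=
      (set_contains_iff _ _).mpr (hmem.mpr hr)
    rw [hc, if_pos rfl]
    cases restOps with
    | nil =>
      have : first = target := by
        simp only [reachb] at hr
        split_ifs at hr <;> simp_all
      simp [this]
    | cons b r =>
      show (match backtrackA target (b :: r) first c with
            | some true => acc + target
            | _ => acc) = acc + target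
      rw [backtrackA_eq_reachb, if_pos hr]
  · have hc : (restOps.foldl (stepB target c)
        (if first ≤ target then PySem.Set.add PySem.Set.empty first else PySem.Set.empty)).contains target = false := by
      rw [Bool.eq_false_iff]
      intro h
      exact hr (hmem.mp ((set_contains_iff _ _).mp h))
    rw [hc]
    simp only [Bool.false_eq_true, if_false]
    cases restOps with
    | nil =>
      have : first ≠ target := by
        intro he
        apply hr
        simp only [reachb, he]
        rw [if_neg (by omega)]
        simp
      simp [this]
    | cons b r =>
      show (match backtrackA target (b :: r) first c with
            | some true => acc + target
            | _ => acc) = acc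
      rw [backtrackA_eq_reachb, if_neg hr]

-- fold the per-line equality up through the calibration list
theorem solve_eq_aux (concat_enabled : Bool) (calibrations : List (Int × List Int))
    (hpre : ∀ c ∈ calibrations, concat_enabled = true → (∀ a ∈ c.2.tail, 0 ≤ a) ∨ c.1 < c.2.headI) :
    ∀ (acc : Int),
      calibrations.foldl (fun calibration_sum c =>
        let target := c.1
        let operands := c.2
        match operands with
        | [] => calibration_sum
        | [a] => if a = target then calibration_sum + target else calibration_sum
        | a :: r =>
          match backtrackA target r a concat_enabled with
          | some true => calibration_sum + c.1
          | _ => calibration_sum) acc =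
      calibrations.foldl (fun total c =>
        let target := c.1
        match c.2 with
        | [] => total
        | first :: restOps =>
          let init : PySem.Set Int := if first ≤ target then PySem.Set.add PySem.Set.empty first else PySem.Set.empty
          let vals := restOps.foldl (stepB target concat_enabled) init
          if vals.contains target then total + target else total) acc := by
  induction calibrations with
  | nil => intro acc; rfl
  | cons c cs ih =>
    intro acc
    simp only [List.foldl_cons]
    rw [ih (fun d hd => hpre d (by simp [hd]))]
    congr 1
    obtain ⟨target, operands⟩ := c
    have hc := hpre (target, operands) (by simp)
    cases operands with
    | nil => rfl
    | cons first restOps =>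
      have h' : (concat_enabled = true → ∀ a ∈ restOps, 0 ≤ a) ∨ target < first := by
        by_cases hce : concat_enabled = true
        · rcases hc hce with h | h
          · exact Or.inl fun _ => by simpa using h
          · exact Or.inr (by simpa using h)
        · exact Or.inl fun h => absurd h hce
      cases restOps with
      | nil => exact line_eq target concat_enabled first [] acc h'
      | cons b r => exact line_eq target concat_enabled first (b :: r) acc h'

-- ===== VERDICT (by name: the statement is the Claim_ definition above) =====
theorem solve_spec : Claim_equal_solve := by
  intro calibrations concat_enabled _ hpre
  unfold Spec_solve solve solve_alt
  exact solve_eq_aux concat_enabled calibrations (fun c hc => (hpre c hc).2) 0
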